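-- pv_equiv track=rewrite | github.com/monkeyman51/VSE_PipeCleaner_2 | pipe_cleaner/src/dashboard_main_setup.py | process_unique_types
-- ===== SOURCE A (Python) =====
-- def process_unique_types(all_machines_in_pipes: list):
--     """
--
--     :param all_machines_in_pipes:
--     :return:
--     """
--     machine_types = sorted(list(set(all_machines_in_pipes)))
--     unique_machine_types: dict = {}
--     all_machine_types: list = []
--
--     for machine_name in machine_types:
--         machine_type = machine_name[8:11]
--         unique_machine_types[machine_type] = 0
--         all_machine_types.append(machine_type)
--
--     for machine_type in all_machine_types:
--         for machine in unique_machine_types: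
--             if machine_type in machine:
--                 unique_machine_types[machine_type] += 1
--
--     return unique_machine_types
-- ===== SOURCE B (Python) =====
-- def process_unique_types(all_machines_in_pipes: list):
--     """Occurrence counts plus a substring-containment index over the short codes,
--     then one multiplication per distinct code (no nested scan per occurrence)."""
--     codes = [name[8:11] for name in sorted(set(all_machines_in_pipes))]
--     mult = {}
--     for code in codes:
--         mult[code] = mult.get(code, 0) + 1
--     contains = {}
--     for key in mult:
--         subs = []
--         for i in range(len(key) + 1):
--             for j in range(i, len(key) + 1):
--                 piece = key[i:j]
--                 if piece not in subs:
--                     subs.append(piece)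
--         for piece in subs:
--             contains[piece] = contains.get(piece, 0) + 1
--     return {code: mult[code] * contains.get(code, 0) for code in mult}
-- ===== Notes on version B (the rewrite author's own statement) =====
-- stated objective: alternative
-- what changed: Replaces A's nested scan (every occurrence of a code tested for containment against every dict key) by a multiplicity dict plus a substring-containment index built by enumerating each distinct key's few substrings once, then one multiplication per distinct code.
import Mathlib
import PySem

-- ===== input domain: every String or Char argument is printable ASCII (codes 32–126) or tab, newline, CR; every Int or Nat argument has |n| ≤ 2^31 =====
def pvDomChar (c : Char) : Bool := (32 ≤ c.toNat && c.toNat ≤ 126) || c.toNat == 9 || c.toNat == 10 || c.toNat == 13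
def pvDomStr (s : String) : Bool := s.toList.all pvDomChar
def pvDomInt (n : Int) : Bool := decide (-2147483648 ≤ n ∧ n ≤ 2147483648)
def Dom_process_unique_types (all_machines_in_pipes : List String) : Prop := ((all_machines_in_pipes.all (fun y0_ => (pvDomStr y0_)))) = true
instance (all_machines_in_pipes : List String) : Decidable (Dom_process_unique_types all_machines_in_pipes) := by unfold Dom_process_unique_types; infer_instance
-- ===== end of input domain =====

-- B replaces A's nested containment scan (every code occurrence against every dict key) by a
-- multiplicity dict plus a substring index built from each distinct ≤3-char key once, then one
-- multiplication per key. Return values proved equal on every input.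

-- ===== PORT A =====
def process_unique_types (all_machines_in_pipes : List String) : List (String × Int) :=
  -- machine_types = sorted(list(set(all_machines_in_pipes)))
  let machine_types := PySem.List.sorted (PySem.Set.ofList all_machines_in_pipes) (fun x => x) false
  -- first loop: build unique_machine_types (dict) and all_machine_types (list) together
  let st := machine_types.foldl
    (fun (st : PySem.Dict String Int × List String) machine_name =>
      let machine_type := PySem.Str.slice machine_name (some 8) (some 11)
      (st.1.insert machine_type 0, st.2 ++ [machine_type]))
    (PySem.Dict.empty, [])
  -- second loop: nested scan, incrementing the entry of machine_type per containing key
  let d := st.2.foldl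
    (fun d machine_type =>
      d.keys.foldl
        (fun d machine =>
          if PySem.Str.isIn machine_type machine then d.modify machine_type 0 (· + 1) else d)
        d)
    st.1
  d.items

-- ===== PORT B =====
def process_unique_types_alt (all_machines_in_pipes : List String) : List (String × Int) :=
  let codes := (PySem.List.sorted (PySem.Set.ofList all_machines_in_pipes) (fun x => x) false).map
      (fun name => PySem.Str.slice name (some 8) (some 11))
  let mult := codes.foldl (fun d c => d.insert c (d.getD c 0 + 1)) PySem.Dict.empty
  let contains := mult.keys.foldl
    (fun d key =>
      -- subs: the distinct substrings of key, first-occurrence order (the 'if piece not in subs' loop)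
      let subs := (PySem.List.pyRange 0 (PySem.Str.len key + 1) 1).foldl
        (fun subs i =>
          (PySem.List.pyRange i (PySem.Str.len key + 1) 1).foldl
            (fun subs j => PySem.Set.add subs (PySem.Str.slice key (some i) (some j)))
            subs)
        []
      subs.foldl (fun d piece => d.insert piece (d.getD piece 0 + 1)) d)
    PySem.Dict.empty
  mult.keys.map (fun c => (c, mult.getD c 0 * contains.getD c 0))

-- ===== PRECONDITION & SPEC =====
def Spec_process_unique_types (all_machines_in_pipes : List String) (out : List (String × Int)) : Prop := out = process_unique_types_alt all_machines_in_pipes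
instance (all_machines_in_pipes : List String) (out : List (String × Int)) : Decidable (Spec_process_unique_types all_machines_in_pipes out) := by unfold Spec_process_unique_types; infer_instance

-- ===== CLAIM (what is proved, stated in full; the proofs are below) =====
def Claim_equal_process_unique_types : Prop := ∀ (all_machines_in_pipes : List String), Dom_process_unique_types all_machines_in_pipes → Spec_process_unique_types all_machines_in_pipes (process_unique_types all_machines_in_pipes)

-- ===== LEMMAS AND PROOFS =====

-- A's first loop, split into its two components.
theorem pv_first_loop (names : List String) (d : PySem.Dict String Int) (acc : List String) :
    names.foldl
      (fun (st : PySem.Dict String Int × List String) machine_name =>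
        let machine_type := PySem.Str.slice machine_name (some 8) (some 11)
        (st.1.insert machine_type 0, st.2 ++ [machine_type]))
      (d, acc)
    = (names.foldl (fun d n => d.insert (PySem.Str.slice n (some 8) (some 11)) 0) d,
       acc ++ names.map (fun n => PySem.Str.slice n (some 8) (some 11))) := by
  induction names generalizing d acc with
  | nil => simp
  | cons n t ih => simp [ih]

-- getD after a fold of constant-0 inserts
theorem pv_getD_insert_zero (names : List String) (d : PySem.Dict String Int) (x : String) :
    (names.foldl (fun d n => d.insert (PySem.Str.slice n (some 8) (some 11)) 0) d).getD x 0
    = if x ∈ names.map (fun n => PySem.Str.slice n (some 8) (some 11)) then 0 else d.getD x 0 := by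
  induction names generalizing d with
  | nil => simp
  | cons n t ih =>
      simp only [List.foldl_cons, ih, List.map_cons, List.mem_cons]
      rw [PySem.Dict.getD_insert]
      by_cases hx : x = PySem.Str.slice n (some 8) (some 11) <;> simp [hx]

-- A's inner loop: value at x
theorem pv_inner_getD (c : String) (L : List String) (d : PySem.Dict String Int) (x : String) :
    (L.foldl (fun d k => if PySem.Str.isIn c k then d.modify c 0 (· + 1) else d) d).getD x 0
    = d.getD x 0 + (if x = c then (L.countP (fun k => PySem.Str.isIn c k) : Int) else 0) := by
  induction L generalizing d with
  | nil => simp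
  | cons k t ih =>
      simp only [List.foldl_cons, List.countP_cons]
      by_cases hk : PySem.Str.isIn c k = true
      · simp only [ih, hk, if_true, PySem.Dict.getD_modify]
        by_cases hx : x = c
        · subst hx; simp; ring
        · simp [hx]
      · simp only [ih, (Bool.not_eq_true _).mp hk, Bool.false_eq_true, if_false]
        by_cases hx : x = c <;> simp [hx]

-- A's inner loop keeps the key list when c is already a key
theorem pv_inner_keys (c : String) (L : List String) (d : PySem.Dict String Int)
    (hc : c ∈ d.keys) :
    (L.foldl (fun d k => if PySem.Str.isIn c k then d.modify c 0 (· + 1) else d) d).keys = d.keys := by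
  induction L generalizing d with
  | nil => rfl
  | cons k t ih =>
      simp only [List.foldl_cons]
      by_cases hk : PySem.Str.isIn c k
      · rw [if_pos hk]
        have hkeys : (d.modify c 0 (· + 1)).keys = d.keys := by
          rw [PySem.Dict.keys_modify, PySem.Dict.keys_insert_of_contains]
          exact (PySem.Dict.contains_iff_mem_keys d c).mpr hc
        rw [ih _ (by rw [hkeys]; exact hc), hkeys]
      · rw [if_neg hk]; exact ih d hc

-- A's outer loop: value at x
theorem pv_outer (codes : List String) (K : List String) (d : PySem.Dict String Int)
    (hK : d.keys = K) (hsub : ∀ c ∈ codes, c ∈ K) (x : String) :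
    (codes.foldl
      (fun d c =>
        d.keys.foldl (fun d k => if PySem.Str.isIn c k then d.modify c 0 (· + 1) else d) d)
      d).getD x 0
    = d.getD x 0 + (codes.count x : Int) * (K.countP (fun k => PySem.Str.isIn x k) : Int) := by
  induction codes generalizing d with
  | nil => simp
  | cons c t ih =>
      simp only [List.foldl_cons]
      have hcK : c ∈ d.keys := by rw [hK]; exact hsub c (by simp)
      have hkeys := pv_inner_keys c d.keys d hcK
      rw [ih _ (by rw [hkeys, hK]) (fun y hy => hsub y (by simp [hy])), pv_inner_getD]
      rw [hK]
      by_cases hx : x = c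
      · subst hx
        simp only [List.count_cons_self]
        push_cast; ring
      · rw [if_neg hx, List.count_cons_of_ne (Ne.symm hx)]
        ring

-- A's outer loop keeps the key list
theorem pv_outer_keys (codes : List String) (K : List String) (d : PySem.Dict String Int)
    (hK : d.keys = K) (hsub : ∀ c ∈ codes, c ∈ K) :
    (codes.foldl
      (fun d c =>
        d.keys.foldl (fun d k => if PySem.Str.isIn c k then d.modify c 0 (· + 1) else d) d)
      d).keys = K := by
  induction codes generalizing d with
  | nil => exact hK
  | cons c t ih =>
      simp only [List.foldl_cons]
      have hcK : c ∈ d.keys := by rw [hK]; exact hsub c (by simp)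
      have hkeys := pv_inner_keys c d.keys d hcK
      exact ih _ (by rw [hkeys, hK]) (fun y hy => hsub y (by simp [hy]))

-- the flat (with-repeats) list of substrings of key, in B's enumeration order
def pvFlat (key : String) : List String :=
  (PySem.List.pyRange 0 (PySem.Str.len key + 1) 1).flatMap
    (fun i => (PySem.List.pyRange i (PySem.Str.len key + 1) 1).map
      (fun j => PySem.Str.slice key (some i) (some j)))

theorem pv_fold_add_flat {α β γ : Type} [BEq γ] (is : List α) (f : α → List β) (g : α → β → γ)
    (s : PySem.Set γ) :
    is.foldl (fun s i => (f i).foldl (fun s j => PySem.Set.add s (g i j)) s) s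
    = List.foldl PySem.Set.add s (is.flatMap (fun i => (f i).map (g i))) := by
  induction is generalizing s with
  | nil => simp
  | cons i t ih => simp [List.foldl_append, ih, List.foldl_map]

-- B's dedup-as-built substring list is Set.ofList of the flat list
theorem pv_subs_eq (key : String) :
    (PySem.List.pyRange 0 (PySem.Str.len key + 1) 1).foldl
      (fun subs i =>
        (PySem.List.pyRange i (PySem.Str.len key + 1) 1).foldl
          (fun subs j => PySem.Set.add subs (PySem.Str.slice key (some i) (some j)))
          subs)
      []
    = PySem.Set.ofList (pvFlat key) := by
  rw [PySem.Set.ofList_eq_foldl, pvFlat]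
  exact pv_fold_add_flat _ _ _ _

-- membership in the substring enumeration is Python's substring containment
theorem pv_flat_mem (c key : String) :
    c ∈ pvFlat key ↔ PySem.Str.isIn c key = true := by
  rw [PySem.Str.isIn_iff_infix, pvFlat]
  simp only [List.mem_flatMap, List.mem_map, PySem.List.mem_pyRange_one]
  constructor
  · rintro ⟨i, ⟨hi0, hi1⟩, j, ⟨hj0, hj1⟩, rfl⟩
    rw [PySem.Str.toList_slice, PySem.Chars.slice,
      PySem.List.slice_toNat _ (by omega) (by omega)]
    exact ((List.take_prefix _ _).isInfix).trans ((List.drop_suffix _ _).isInfix)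
  · rintro ⟨s, t, hl⟩
    refine ⟨(s.length : Int), ⟨by positivity, ?_⟩, (s.length : Int) + (c.toList.length : Int),
      ⟨by omega, ?_⟩, ?_⟩
    · have : s.length + c.toList.length + t.length = key.toList.length := by
        rw [← hl]; simp; omega
      rw [PySem.Str.len_eq]; omega
    · have : s.length + c.toList.length + t.length = key.toList.length := by
        rw [← hl]; simp; omega
      rw [PySem.Str.len_eq]; omega
    · have hkey : key.toList = s ++ (c.toList ++ t) := by rw [← hl, List.append_assoc]
      have h2 : (PySem.Str.slice key (some (s.length : Int))
          (some ((s.length : Int) + (c.toList.length : Int)))).toList = c.toList := by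
        rw [PySem.Str.toList_slice, PySem.Chars.slice, ← Nat.cast_add,
          PySem.List.slice_toNat _ (by positivity) (by positivity),
          Int.toNat_natCast, Int.toNat_natCast, Nat.add_sub_cancel_left, hkey,
          List.drop_left, List.take_left]
      simpa using congrArg String.ofList h2

-- B's contains dict: value at c
theorem pv_contains_getD (c : String) (K : List String) (d : PySem.Dict String Int) :
    (K.foldl
      (fun d key =>
        (PySem.Set.ofList (pvFlat key)).foldl
          (fun d piece => d.insert piece (d.getD piece 0 + 1)) d)
      d).getD c 0
    = d.getD c 0 + (K.countP (fun k => decide (c ∈ pvFlat k)) : Int) := by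
  induction K generalizing d with
  | nil => simp
  | cons k t ih =>
      simp only [List.foldl_cons, List.countP_cons, ih,
        PySem.Dict.getD_foldl_insert_add_one]
      by_cases hc : c ∈ pvFlat k
      · have h1 : List.count c (PySem.Set.ofList (pvFlat k)) = 1 :=
          List.count_eq_one_of_mem (PySem.Set.nodup_ofList _) ((PySem.Set.mem_ofList _ _).mpr hc)
        simp [hc]
        omega
      · have h0 : List.count c (PySem.Set.ofList (pvFlat k)) = 0 :=
          List.count_eq_zero_of_not_mem (fun h => hc ((PySem.Set.mem_ofList _ _).mp h))
        simp [h0, hc]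

-- ===== VERDICT (by name: the statement is the Claim_ definition above) =====
theorem process_unique_types_spec : Claim_equal_process_unique_types := by
  intro xs _
  show process_unique_types xs = process_unique_types_alt xs
  unfold process_unique_types process_unique_types_alt
  simp only [pv_first_loop, pv_subs_eq, List.nil_append]
  set names := PySem.List.sorted (PySem.Set.ofList xs) (fun x => x) false with hnames
  set codes := names.map (fun n => PySem.Str.slice n (some 8) (some 11)) with hcodes
  have hsub : ∀ c ∈ codes, c ∈ PySem.Set.ofList codes :=
    fun c hc => (PySem.Set.mem_ofList codes c).mpr hc
  have hd0keys : (List.foldl (fun d n => d.insert (PySem.Str.slice n (some 8) (some 11)) (0 : Int))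
      (PySem.Dict.empty : PySem.Dict String Int) names).keys = PySem.Set.ofList codes := by
    rw [PySem.Dict.keys_foldl_insert_key names (fun n => PySem.Str.slice n (some 8) (some 11))
      (fun _ _ => 0) PySem.Dict.empty, PySem.Dict.keys_empty, ← hcodes,
      PySem.Set.ofList_eq_foldl]
    rfl
  have hmultkeys : (List.foldl (fun d c => d.insert c (d.getD c 0 + 1))
      (PySem.Dict.empty : PySem.Dict String Int) codes).keys = PySem.Set.ofList codes := by
    rw [PySem.Dict.keys_foldl_insert codes (fun d c => d.getD c 0 + 1) PySem.Dict.empty,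
      PySem.Dict.keys_empty, PySem.Set.ofList_eq_foldl]
    rfl
  have hd2keys := pv_outer_keys codes (PySem.Set.ofList codes)
    (List.foldl (fun d n => d.insert (PySem.Str.slice n (some 8) (some 11)) 0) PySem.Dict.empty names)
    hd0keys hsub
  rw [PySem.Dict.items_eq_map_keys _ (by rw [hd2keys]; exact PySem.Set.nodup_ofList codes) 0,
    hd2keys, hmultkeys]
  apply List.map_congr_left
  intro c hcK
  simp only [Prod.mk.injEq, true_and]
  rw [pv_outer codes (PySem.Set.ofList codes)
      (List.foldl (fun d n => d.insert (PySem.Str.slice n (some 8) (some 11)) 0) PySem.Dict.empty names)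
      hd0keys hsub c,
    pv_getD_insert_zero, PySem.Dict.getD_foldl_insert_add_one, PySem.Dict.getD_empty,
    pv_contains_getD, PySem.Dict.getD_empty]
  have hcnt : List.countP (fun k => decide (c ∈ pvFlat k)) (PySem.Set.ofList codes)
      = List.countP (fun k => PySem.Str.isIn c k) (PySem.Set.ofList codes) :=
    List.countP_congr (fun k _ => by simp [pv_flat_mem c k])
  rw [hcnt]
  simp
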